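-- pv_equiv track=rewrite | github.com/Divyamm05/diff-match-patch | diff_match_patch.py | _diff_compute
-- ===== SOURCE A (Python) =====
-- def _diff_compute(text1, text2):
--     """
--     Find the differences between two texts using a simple greedy algorithm.
--     Returns a list of tuples representing the differences.
--     """
--     diffs = []
--     len1, len2 = len(text1), len(text2)
--     i, j = 0, 0
--
--     while i < len1 and j < len2:
--         if text1[i] == text2[j]:
--             # Find matching substring
--             start = i
--             while i < len1 and j < len2 and text1[i] == text2[j]:
--                 i += 1
--                 j += 1
--             diffs.append((0, text1[start:i]))
--         else:
--             # Find non-matching substrings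
--             start_i, start_j = i, j
--             while i < len1 and j < len2 and text1[i] != text2[j]:
--                 i += 1
--                 j += 1
--             if start_i != i:
--                 diffs.append((-1, text1[start_i:i]))
--             if start_j != j:
--                 diffs.append((1, text2[start_j:j]))
--
--     if i < len1:
--         diffs.append((-1, text1[i:]))
--     if j < len2:
--         diffs.append((1, text2[j:]))
--
--     return diffs
-- ===== SOURCE B (Python) =====
-- def _diff_compute(text1, text2):
--     """
--     Find the differences between two texts using a simple greedy algorithm.
--     Returns a list of tuples representing the differences.
--     """
--     # Since both cursors of the greedy scan always advance together, only the
--     # common prefix of length min(len1, len2) is ever compared position by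
--     # position: one flat pass detects run boundaries of the "chars equal" flag.
--     n = min(len(text1), len(text2))
--     diffs = []
--     start = 0
--     for k in range(1, n + 1):
--         if k == n or (text1[k] == text2[k]) != (text1[start] == text2[start]):
--             if text1[start] == text2[start]:
--                 diffs.append((0, text1[start:k]))
--             else:
--                 diffs.append((-1, text1[start:k]))
--                 diffs.append((1, text2[start:k]))
--             start = k
--     if n < len(text1):
--         diffs.append((-1, text1[n:]))
--     if n < len(text2):
--         diffs.append((1, text2[n:]))
--     return diffs
-- ===== Notes on version B (the rewrite author's own statement) =====
-- stated objective: alternative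
-- what changed: Replaced A's outer while-loop with two independent cursors and three nested inner scans by one flat pass over the common prefix min(len1,len2) that detects run boundaries of the per-position 'chars equal' flag (the two cursors always advance together), emitting each group at its boundary and the leftover tails afterwards.
import Mathlib
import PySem

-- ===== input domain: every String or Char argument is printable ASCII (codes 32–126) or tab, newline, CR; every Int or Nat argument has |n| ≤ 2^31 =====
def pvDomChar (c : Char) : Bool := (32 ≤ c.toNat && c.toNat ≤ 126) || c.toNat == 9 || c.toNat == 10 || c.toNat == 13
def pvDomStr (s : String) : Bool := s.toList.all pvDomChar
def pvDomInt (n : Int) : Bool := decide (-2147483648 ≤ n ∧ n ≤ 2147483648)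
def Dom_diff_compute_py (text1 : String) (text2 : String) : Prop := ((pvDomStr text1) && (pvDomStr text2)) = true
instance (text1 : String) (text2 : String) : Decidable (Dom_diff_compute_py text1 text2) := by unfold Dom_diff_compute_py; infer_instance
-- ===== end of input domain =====

-- B replaces A's outer while-loop (two cursors, three nested inner scans) by one flat pass over the
-- common prefix that detects run boundaries of the "chars equal" flag; same O(n) cost (objective: alternative).
-- Loops are ported with a structural fuel parameter large enough that it never runs out (each
-- iteration advances the index by at least 1), so every `match fuel` transcribes its Python `while`/`for`.

-- ===== PORT A =====
-- inner `while ... and text1[i] == text2[j]` loop of A; returns the advanced (i, j)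
def pvMatchLoop (t1 t2 : List Char) (fuel i j : Nat) : Nat × Nat :=
  match fuel with
  | 0 => (i, j)
  | fuel + 1 =>
    if i < t1.length ∧ j < t2.length ∧ (t1[i]? == t2[j]?) = true then
      pvMatchLoop t1 t2 fuel (i + 1) (j + 1)
    else (i, j)

-- inner `while ... and text1[i] != text2[j]` loop of A; returns the advanced (i, j)
def pvMismatchLoop (t1 t2 : List Char) (fuel i j : Nat) : Nat × Nat :=
  match fuel with
  | 0 => (i, j)
  | fuel + 1 =>
    if i < t1.length ∧ j < t2.length ∧ (t1[i]? == t2[j]?) = false then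
      pvMismatchLoop t1 t2 fuel (i + 1) (j + 1)
    else (i, j)

-- outer `while i < len1 and j < len2` loop of A accumulating diffs; A's two trailing appends are
-- the exit branch.  Python slice text1[a:b] (0 ≤ a ≤ b ≤ len) is exactly drop/take.
def pvOuterA (t1 t2 : List Char) (fuel : Nat) (i j : Nat) (diffs : List (Int × String)) : List (Int × String) :=
  match fuel with
  | 0 => diffs
  | fuel + 1 =>
    if i < t1.length ∧ j < t2.length then
      if (t1[i]? == t2[j]?) = true then
        pvOuterA t1 t2 fuel (pvMatchLoop t1 t2 (t1.length - i) i j).1 (pvMatchLoop t1 t2 (t1.length - i) i j).2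
          (diffs ++ [((0 : Int), String.ofList ((t1.drop i).take ((pvMatchLoop t1 t2 (t1.length - i) i j).1 - i)))])
      else
        pvOuterA t1 t2 fuel (pvMismatchLoop t1 t2 (t1.length - i) i j).1 (pvMismatchLoop t1 t2 (t1.length - i) i j).2
          (diffs ++ (if i ≠ (pvMismatchLoop t1 t2 (t1.length - i) i j).1 then
                       [((-1 : Int), String.ofList ((t1.drop i).take ((pvMismatchLoop t1 t2 (t1.length - i) i j).1 - i)))] else [])
                 ++ (if j ≠ (pvMismatchLoop t1 t2 (t1.length - i) i j).2 then
                       [((1 : Int), String.ofList ((t2.drop j).take ((pvMismatchLoop t1 t2 (t1.length - i) i j).2 - j)))] else []))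
    else
      diffs ++ (if i < t1.length then [((-1 : Int), String.ofList (t1.drop i))] else [])
            ++ (if j < t2.length then [((1 : Int), String.ofList (t2.drop j))] else [])

def diff_compute_py (text1 : String) (text2 : String) : List (Int × String) :=
  pvOuterA text1.toList text2.toList (text1.toList.length + 1) 0 0 []

-- ===== PORT B =====
-- B's single `for k in range(1, n + 1)` loop with run start `start` and the diffs accumulator
def pvGroupsB (t1 t2 : List Char) (fuel n k start : Nat) (diffs : List (Int × String)) : List (Int × String) :=
  match fuel with
  | 0 => diffs
  | fuel + 1 =>
    if k < n + 1 then
      if k = n ∨ (t1[k]? == t2[k]?) ≠ (t1[start]? == t2[start]?) then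
        if (t1[start]? == t2[start]?) = true then
          pvGroupsB t1 t2 fuel n (k + 1) k
            (diffs ++ [((0 : Int), String.ofList ((t1.drop start).take (k - start)))])
        else
          pvGroupsB t1 t2 fuel n (k + 1) k
            (diffs ++ [((-1 : Int), String.ofList ((t1.drop start).take (k - start))),
                       ((1 : Int), String.ofList ((t2.drop start).take (k - start)))])
      else
        pvGroupsB t1 t2 fuel n (k + 1) start diffs
    else diffs

def diff_compute_py_alt (text1 : String) (text2 : String) : List (Int × String) :=
  let t1 := text1.toList
  let t2 := text2.toList
  let n := min t1.length t2.length
  pvGroupsB t1 t2 (n + 1) n 1 0 []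
    ++ (if n < t1.length then [((-1 : Int), String.ofList (t1.drop n))] else [])
    ++ (if n < t2.length then [((1 : Int), String.ofList (t2.drop n))] else [])

-- ===== PRECONDITION & SPEC =====
def Spec_diff_compute_py (text1 : String) (text2 : String) (out : List (Int × String)) : Prop := out = diff_compute_py_alt text1 text2
instance (text1 : String) (text2 : String) (out : List (Int × String)) : Decidable (Spec_diff_compute_py text1 text2 out) := by unfold Spec_diff_compute_py; infer_instance

-- ===== CLAIM (what is proved, stated in full; the proofs are below) =====
def Claim_equal_diff_compute_py : Prop := ∀ (text1 : String) (text2 : String), Dom_diff_compute_py text1 text2 → Spec_diff_compute_py text1 text2 (diff_compute_py text1 text2)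

-- ===== LEMMAS AND PROOFS =====

-- the end position of a maximal run of equal characters starting at k (the two cursors coincide)
def pvMEnd (t1 t2 : List Char) (k : Nat) : Nat :=
  if k < min t1.length t2.length ∧ (t1[k]? == t2[k]?) = true then pvMEnd t1 t2 (k + 1) else k
termination_by min t1.length t2.length - k

-- the end position of a maximal run of unequal characters starting at k
def pvDEnd (t1 t2 : List Char) (k : Nat) : Nat :=
  if k < min t1.length t2.length ∧ (t1[k]? == t2[k]?) = false then pvDEnd t1 t2 (k + 1) else k
termination_by min t1.length t2.length - k

theorem pvMEnd_spec (t1 t2 : List Char) (k : Nat) :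
    k ≤ pvMEnd t1 t2 k ∧ (k ≤ min t1.length t2.length → pvMEnd t1 t2 k ≤ min t1.length t2.length)
      ∧ ¬(pvMEnd t1 t2 k < min t1.length t2.length ∧ (t1[pvMEnd t1 t2 k]? == t2[pvMEnd t1 t2 k]?) = true) := by
  fun_induction pvMEnd t1 t2 k with
  | case1 k h ih => exact ⟨by omega, fun _ => ih.2.1 (by omega), ih.2.2⟩
  | case2 k h => exact ⟨le_refl _, fun hk => by omega, h⟩

theorem pvDEnd_spec (t1 t2 : List Char) (k : Nat) :
    k ≤ pvDEnd t1 t2 k ∧ (k ≤ min t1.length t2.length → pvDEnd t1 t2 k ≤ min t1.length t2.length)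
      ∧ ¬(pvDEnd t1 t2 k < min t1.length t2.length ∧ (t1[pvDEnd t1 t2 k]? == t2[pvDEnd t1 t2 k]?) = false) := by
  fun_induction pvDEnd t1 t2 k with
  | case1 k h ih => exact ⟨by omega, fun _ => ih.2.1 (by omega), ih.2.2⟩
  | case2 k h => exact ⟨le_refl _, fun hk => by omega, h⟩

-- A's match loop at equal cursors computes pvMEnd (whenever the fuel covers the run)
theorem pvMatchLoop_eq_mEnd (t1 t2 : List Char) :
    ∀ fuel k, pvMEnd t1 t2 k - k ≤ fuel →
    pvMatchLoop t1 t2 fuel k k = (pvMEnd t1 t2 k, pvMEnd t1 t2 k) := by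
  intro fuel
  induction fuel with
  | zero =>
    intro k hk
    have h1 := (pvMEnd_spec t1 t2 k).1
    have h2 : pvMEnd t1 t2 k = k := by omega
    rw [pvMatchLoop, h2]
  | succ fuel ih =>
    intro k hk
    by_cases h : k < min t1.length t2.length ∧ (t1[k]? == t2[k]?) = true
    · have hm : pvMEnd t1 t2 k = pvMEnd t1 t2 (k + 1) := by
        conv_lhs => rw [pvMEnd]
        rw [if_pos h]
      have h1 := (pvMEnd_spec t1 t2 (k + 1)).1
      rw [pvMatchLoop, if_pos ⟨by omega, by omega, h.2⟩, hm]
      exact ih (k + 1) (by omega)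
    · have hm : pvMEnd t1 t2 k = k := by rw [pvMEnd, if_neg h]
      rw [pvMatchLoop, if_neg (fun hc => h ⟨by omega, hc.2.2⟩), hm]

theorem pvMismatchLoop_eq_dEnd (t1 t2 : List Char) :
    ∀ fuel k, pvDEnd t1 t2 k - k ≤ fuel →
    pvMismatchLoop t1 t2 fuel k k = (pvDEnd t1 t2 k, pvDEnd t1 t2 k) := by
  intro fuel
  induction fuel with
  | zero =>
    intro k hk
    have h1 := (pvDEnd_spec t1 t2 k).1
    have h2 : pvDEnd t1 t2 k = k := by omega
    rw [pvMismatchLoop, h2]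
  | succ fuel ih =>
    intro k hk
    by_cases h : k < min t1.length t2.length ∧ (t1[k]? == t2[k]?) = false
    · have hm : pvDEnd t1 t2 k = pvDEnd t1 t2 (k + 1) := by
        conv_lhs => rw [pvDEnd]
        rw [if_pos h]
      have h1 := (pvDEnd_spec t1 t2 (k + 1)).1
      rw [pvMismatchLoop, if_pos ⟨by omega, by omega, h.2⟩, hm]
      exact ih (k + 1) (by omega)
    · have hm : pvDEnd t1 t2 k = k := by rw [pvDEnd, if_neg h]
      rw [pvMismatchLoop, if_neg (fun hc => h ⟨by omega, hc.2.2⟩), hm]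

-- the fuel is irrelevant once it covers the remaining iterations
theorem pvGroupsB_fuel (t1 t2 : List Char) (n : Nat) :
    ∀ f g k start acc, n + 1 - k ≤ f → n + 1 - k ≤ g →
    pvGroupsB t1 t2 f n k start acc = pvGroupsB t1 t2 g n k start acc := by
  intro f
  induction f with
  | zero =>
    intro g k start acc hf hg
    rw [pvGroupsB]
    cases g with
    | zero => rfl
    | succ g => rw [pvGroupsB, if_neg (by omega)]
  | succ f ih =>
    intro g k start acc hf hg
    by_cases hk : k < n + 1
    · cases g with
      | zero => omega
      | succ g =>
        rw [pvGroupsB, pvGroupsB]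
        split_ifs with h1 h2
        · exact ih g (k + 1) k _ (by omega) (by omega)
        · exact ih g (k + 1) k _ (by omega) (by omega)
        · exact ih g (k + 1) start acc (by omega) (by omega)
    · rw [pvGroupsB, if_neg hk]
      cases g with
      | zero => rfl
      | succ g => rw [pvGroupsB, if_neg hk]

-- one unfolding step of B's loop at the canonical fuel n + 2
theorem pvGroupsB_step (t1 t2 : List Char) (n k start : Nat) (acc : List (Int × String)) :
    pvGroupsB t1 t2 (n + 2) n k start acc =
      if k < n + 1 then
        if k = n ∨ (t1[k]? == t2[k]?) ≠ (t1[start]? == t2[start]?) then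
          if (t1[start]? == t2[start]?) = true then
            pvGroupsB t1 t2 (n + 2) n (k + 1) k
              (acc ++ [((0 : Int), String.ofList ((t1.drop start).take (k - start)))])
          else
            pvGroupsB t1 t2 (n + 2) n (k + 1) k
              (acc ++ [((-1 : Int), String.ofList ((t1.drop start).take (k - start))),
                       ((1 : Int), String.ofList ((t2.drop start).take (k - start)))])
        else
          pvGroupsB t1 t2 (n + 2) n (k + 1) start acc
      else acc := by
  conv_lhs => rw [show n + 2 = (n + 1) + 1 from rfl, pvGroupsB]
  split_ifs with h1 h2 h3
  · exact pvGroupsB_fuel t1 t2 n (n + 1) (n + 2) (k + 1) k _ (by omega) (by omega)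
  · exact pvGroupsB_fuel t1 t2 n (n + 1) (n + 2) (k + 1) k _ (by omega) (by omega)
  · exact pvGroupsB_fuel t1 t2 n (n + 1) (n + 2) (k + 1) start acc (by omega) (by omega)
  · rfl

-- B's scan inside a group of equal characters runs to the boundary pvMEnd
theorem pvGroupsB_match (t1 t2 : List Char) (i : Nat) :
    ∀ fuel k acc, min t1.length t2.length + 1 - k ≤ fuel → i < k → k ≤ min t1.length t2.length →
    (t1[i]? == t2[i]?) = true →
    pvGroupsB t1 t2 (min t1.length t2.length + 2) (min t1.length t2.length) k i acc =
      (if pvMEnd t1 t2 k < min t1.length t2.length then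
        pvGroupsB t1 t2 (min t1.length t2.length + 2) (min t1.length t2.length)
          (pvMEnd t1 t2 k + 1) (pvMEnd t1 t2 k)
          (acc ++ [((0 : Int), String.ofList ((t1.drop i).take (pvMEnd t1 t2 k - i)))])
      else acc ++ [((0 : Int), String.ofList ((t1.drop i).take (pvMEnd t1 t2 k - i)))]) := by
  intro fuel
  induction fuel with
  | zero => intro k acc hfu hik hk hf; omega
  | succ fuel ih =>
    intro k acc hfu hik hk hf
    by_cases hkn : k = min t1.length t2.length
    · subst hkn
      have hm : pvMEnd t1 t2 (min t1.length t2.length) = min t1.length t2.length := by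
        rw [pvMEnd, if_neg (by omega)]
      rw [pvGroupsB_step, if_pos (by omega), if_pos (Or.inl rfl), if_pos hf,
        pvGroupsB_step, if_neg (by omega), hm, if_neg (by omega)]
    · have hklt : k < min t1.length t2.length := by omega
      by_cases hfk : (t1[k]? == t2[k]?) = true
      · -- same flag: B keeps scanning, boundary is further right
        have : pvMEnd t1 t2 k = pvMEnd t1 t2 (k + 1) := by
          conv_lhs => rw [pvMEnd]
          rw [if_pos ⟨hklt, hfk⟩]
        rw [pvGroupsB_step, if_pos (by omega),
          if_neg (by rw [hf, hfk]; simp [hkn]), this]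
        exact ih (k + 1) acc (by omega) (by omega) (by omega) hf
      · -- flag flips at k: the group ends here
        have hm : pvMEnd t1 t2 k = k := by
          rw [pvMEnd, if_neg (fun hc => hfk hc.2)]
        rw [pvGroupsB_step, if_pos (by omega),
          if_pos (Or.inr (by rw [hf]; simpa using hfk)), if_pos hf, hm, if_pos hklt]

-- B's scan inside a group of unequal characters runs to the boundary pvDEnd
theorem pvGroupsB_mismatch (t1 t2 : List Char) (i : Nat) :
    ∀ fuel k acc, min t1.length t2.length + 1 - k ≤ fuel → i < k → k ≤ min t1.length t2.length →
    (t1[i]? == t2[i]?) = false →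
    pvGroupsB t1 t2 (min t1.length t2.length + 2) (min t1.length t2.length) k i acc =
      (if pvDEnd t1 t2 k < min t1.length t2.length then
        pvGroupsB t1 t2 (min t1.length t2.length + 2) (min t1.length t2.length)
          (pvDEnd t1 t2 k + 1) (pvDEnd t1 t2 k)
          (acc ++ [((-1 : Int), String.ofList ((t1.drop i).take (pvDEnd t1 t2 k - i))),
                   ((1 : Int), String.ofList ((t2.drop i).take (pvDEnd t1 t2 k - i)))])
      else acc ++ [((-1 : Int), String.ofList ((t1.drop i).take (pvDEnd t1 t2 k - i))),
                   ((1 : Int), String.ofList ((t2.drop i).take (pvDEnd t1 t2 k - i)))]) := by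
  intro fuel
  induction fuel with
  | zero => intro k acc hfu hik hk hf; omega
  | succ fuel ih =>
    intro k acc hfu hik hk hf
    by_cases hkn : k = min t1.length t2.length
    · subst hkn
      have hm : pvDEnd t1 t2 (min t1.length t2.length) = min t1.length t2.length := by
        rw [pvDEnd, if_neg (by omega)]
      rw [pvGroupsB_step, if_pos (by omega), if_pos (Or.inl rfl), if_neg (by rw [hf]; simp),
        pvGroupsB_step, if_neg (by omega), hm, if_neg (by omega)]
    · have hklt : k < min t1.length t2.length := by omega
      by_cases hfk : (t1[k]? == t2[k]?) = false
      · have : pvDEnd t1 t2 k = pvDEnd t1 t2 (k + 1) := by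
          conv_lhs => rw [pvDEnd]
          rw [if_pos ⟨hklt, hfk⟩]
        rw [pvGroupsB_step, if_pos (by omega),
          if_neg (by rw [hf, hfk]; simp [hkn]), this]
        exact ih (k + 1) acc (by omega) (by omega) (by omega) hf
      · have hm : pvDEnd t1 t2 k = k := by
          rw [pvDEnd, if_neg (fun hc => hfk hc.2)]
        rw [pvGroupsB_step, if_pos (by omega),
          if_pos (Or.inr (by rw [hf]; simpa using hfk)), if_neg (by rw [hf]; simp), hm, if_pos hklt]

-- exit of A's outer loop at i = j = min
theorem pvOuterA_exit (t1 t2 : List Char) (fuel : Nat) (acc : List (Int × String)) :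
    pvOuterA t1 t2 (fuel + 1) (min t1.length t2.length) (min t1.length t2.length) acc =
      acc ++ (if min t1.length t2.length < t1.length then
               [((-1 : Int), String.ofList (t1.drop (min t1.length t2.length)))] else [])
          ++ (if min t1.length t2.length < t2.length then
               [((1 : Int), String.ofList (t2.drop (min t1.length t2.length)))] else []) := by
  rw [pvOuterA, if_neg (by omega)]

-- main correspondence: A's outer loop at equal cursors i = B's scan with k = i+1, start = i, plus tails
theorem pvOuterA_eq_groupsB (t1 t2 : List Char) :
    ∀ fuel i acc, min t1.length t2.length - i < fuel → i ≤ min t1.length t2.length →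
    pvOuterA t1 t2 fuel i i acc =
      (if i < min t1.length t2.length then
        pvGroupsB t1 t2 (min t1.length t2.length + 2) (min t1.length t2.length) (i + 1) i acc
      else acc)
      ++ (if min t1.length t2.length < t1.length then
            [((-1 : Int), String.ofList (t1.drop (min t1.length t2.length)))] else [])
      ++ (if min t1.length t2.length < t2.length then
            [((1 : Int), String.ofList (t2.drop (min t1.length t2.length)))] else []) := by
  intro fuel
  induction fuel with
  | zero => intro i acc hfu hi; omega
  | succ fuel ih =>
    intro i acc hfu hi
    by_cases hlt : i < min t1.length t2.length
    · rw [if_pos hlt]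
      by_cases hf : (t1[i]? == t2[i]?) = true
      · -- equal-characters group
        have hstep : pvMEnd t1 t2 i = pvMEnd t1 t2 (i + 1) := by
          conv_lhs => rw [pvMEnd]
          rw [if_pos ⟨hlt, hf⟩]
        have hgt : i < pvMEnd t1 t2 (i + 1) := by
          have := (pvMEnd_spec t1 t2 (i + 1)).1; omega
        have hle : pvMEnd t1 t2 (i + 1) ≤ min t1.length t2.length :=
          (pvMEnd_spec t1 t2 (i + 1)).2.1 (by omega)
        have hml : pvMatchLoop t1 t2 (t1.length - i) i i = (pvMEnd t1 t2 i, pvMEnd t1 t2 i) :=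
          pvMatchLoop_eq_mEnd t1 t2 (t1.length - i) i (by omega)
        rw [pvOuterA, if_pos ⟨by omega, by omega⟩, if_pos hf, hml, hstep]
        rw [pvGroupsB_match t1 t2 i (min t1.length t2.length + 1) (i + 1) acc (by omega)
          (by omega) (by omega) hf]
        by_cases hend : pvMEnd t1 t2 (i + 1) < min t1.length t2.length
        · rw [if_pos hend,
            ih (pvMEnd t1 t2 (i + 1)) _ (by omega) (by omega), if_pos hend]
        · have : pvMEnd t1 t2 (i + 1) = min t1.length t2.length := by omega
          rw [if_neg hend, this, ih (min t1.length t2.length) _ (by omega) (by omega),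
            if_neg (by omega)]
      · -- unequal-characters group
        have hf' : (t1[i]? == t2[i]?) = false := by simpa using hf
        have hstep : pvDEnd t1 t2 i = pvDEnd t1 t2 (i + 1) := by
          conv_lhs => rw [pvDEnd]
          rw [if_pos ⟨hlt, hf'⟩]
        have hgt : i < pvDEnd t1 t2 (i + 1) := by
          have := (pvDEnd_spec t1 t2 (i + 1)).1; omega
        have hle : pvDEnd t1 t2 (i + 1) ≤ min t1.length t2.length :=
          (pvDEnd_spec t1 t2 (i + 1)).2.1 (by omega)
        have hml : pvMismatchLoop t1 t2 (t1.length - i) i i = (pvDEnd t1 t2 i, pvDEnd t1 t2 i) :=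
          pvMismatchLoop_eq_dEnd t1 t2 (t1.length - i) i (by omega)
        rw [pvOuterA, if_pos ⟨by omega, by omega⟩, if_neg hf, hml, hstep]
        rw [if_pos (by omega : i ≠ pvDEnd t1 t2 (i + 1)),
          if_pos (by omega : i ≠ pvDEnd t1 t2 (i + 1))]
        rw [pvGroupsB_mismatch t1 t2 i (min t1.length t2.length + 1) (i + 1) acc (by omega)
          (by omega) (by omega) hf']
        by_cases hend : pvDEnd t1 t2 (i + 1) < min t1.length t2.length
        · rw [if_pos hend,
            ih (pvDEnd t1 t2 (i + 1)) _ (by omega) (by omega), if_pos hend]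
          simp
        · have : pvDEnd t1 t2 (i + 1) = min t1.length t2.length := by omega
          rw [if_neg hend, this, ih (min t1.length t2.length) _ (by omega) (by omega),
            if_neg (by omega)]
          simp
    · have : i = min t1.length t2.length := by omega
      subst this
      rw [if_neg (by omega)]
      exact pvOuterA_exit t1 t2 fuel acc

-- ===== VERDICT (by name: the statement is the Claim_ definition above) =====
theorem diff_compute_py_spec : Claim_equal_diff_compute_py := by
  intro text1 text2 _
  unfold Spec_diff_compute_py diff_compute_py diff_compute_py_alt
  simp only []
  rw [pvOuterA_eq_groupsB text1.toList text2.toList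
    (text1.toList.length + 1) 0 [] (by omega) (by omega)]
  by_cases h0 : 0 < min text1.toList.length text2.toList.length
  · rw [if_pos h0,
      pvGroupsB_fuel text1.toList text2.toList (min text1.toList.length text2.toList.length)
        (min text1.toList.length text2.toList.length + 2)
        (min text1.toList.length text2.toList.length + 1) 1 0 [] (by omega) (by omega)]
  · rw [if_neg h0,
      show min text1.toList.length text2.toList.length + 1 = 0 + 1 from by omega, pvGroupsB,
      if_neg (show ¬ (1 < min text1.toList.length text2.toList.length + 1) by omega)]
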